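-- pv_equiv track=rewrite | github.com/pypi-data/pypi-mirror-398 | packages/fast-bitrix24-mcp/fast_bitrix24_mcp-1.0.15-py3-none-any.whl/fast_bitrix24_mcp/tools/helper.py | _extract_operator_from_key
-- ===== SOURCE A (Python) =====
-- def _extract_operator_from_key(key: str) -> tuple[str, str]:
--     """Извлекает оператор из ключа, если он есть. Возвращает (оператор, имя_поля)."""
--     # Операторы, которые могут быть в начале ключа
--     operators = [">=", "<=", "!=", "==", ">", "<", "!"]
--     for op in operators:
--         if key.startswith(op):
--             field_name = key[len(op):]
--             # Преобразуем оператор в стандартный формат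
--             if op == "!":
--                 return ("!=", field_name)
--             return (op, field_name)
--     # Нет оператора в ключе
--     return ("==", key)
-- ===== SOURCE B (Python) =====
-- def _extract_operator_from_key(key: str) -> tuple[str, str]:
--     """Извлекает оператор из ключа, если он есть. Возвращает (оператор, имя_поля)."""
--     head = key[:1]
--     if head in (">", "<", "!"):
--         extended = key[1:2] == "="
--         n = 2 if extended else 1
--         op = head + "=" if (extended or head == "!") else head
--         return (op, key[n:])
--     if head == "=" and key[1:2] == "=":
--         return ("==", key[2:])
--     return ("==", key)
-- ===== Notes on version B (the rewrite author's own statement) =====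
-- stated objective: idiomatic
-- what changed: Instead of scanning an ordered list of operator prefixes with startswith, B classifies the first character into a family (comparison, negation, equality, none) and constructs the operator from the key's characters, extending it when the second character marks a two-character operator; no operator table exists in B.
import Mathlib
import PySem

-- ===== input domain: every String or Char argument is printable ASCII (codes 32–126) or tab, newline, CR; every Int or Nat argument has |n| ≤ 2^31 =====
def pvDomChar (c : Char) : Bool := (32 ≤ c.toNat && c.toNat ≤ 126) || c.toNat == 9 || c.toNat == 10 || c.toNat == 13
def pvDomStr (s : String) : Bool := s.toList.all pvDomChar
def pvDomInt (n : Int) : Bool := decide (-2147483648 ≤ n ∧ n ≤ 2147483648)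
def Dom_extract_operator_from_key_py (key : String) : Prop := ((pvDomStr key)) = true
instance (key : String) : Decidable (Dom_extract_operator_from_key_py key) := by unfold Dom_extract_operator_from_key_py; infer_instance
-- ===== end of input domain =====

-- B drops A's ordered prefix-list scan: it classifies the first character and BUILDS the
-- operator from characters (appending '=' when the second char extends it); idiomatic/simpler.

-- ===== PORT A =====
-- loop 'for op in operators: …' of A, transliterated as structural recursion over the operator list
def extractOpLoopA (key : String) : List String → String × String
  | [] => ("==", key)
  | op :: rest =>
    if PySem.Str.startswith key op then
      let field_name := PySem.Str.slice key (some (PySem.Str.len op : Int)) none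
      if op = "!" then ("!=", field_name) else (op, field_name)
    else extractOpLoopA key rest

def extract_operator_from_key_py (key : String) : String × String :=
  extractOpLoopA key [">=", "<=", "!=", "==", ">", "<", "!"]

-- ===== PORT B =====
def extract_operator_from_key_py_alt (key : String) : String × String :=
  let head := PySem.Str.slice key none (some 1)
  if head = ">" ∨ head = "<" ∨ head = "!" then
    let extended := PySem.Str.slice key (some 1) (some 2) = "="
    let n : Int := if extended then 2 else 1
    let op := if extended ∨ head = "!" then head ++ "=" else head
    (op, PySem.Str.slice key (some n) none)
  else if head = "=" ∧ PySem.Str.slice key (some 1) (some 2) = "=" then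
    ("==", PySem.Str.slice key (some 2) none)
  else ("==", key)

-- ===== PRECONDITION & SPEC =====
def Spec_extract_operator_from_key_py (key : String) (out : String × String) : Prop := out = extract_operator_from_key_py_alt key
instance (key : String) (out : String × String) : Decidable (Spec_extract_operator_from_key_py key out) := by unfold Spec_extract_operator_from_key_py; infer_instance

-- ===== CLAIM (what is proved, stated in full; the proofs are below) =====
def Claim_equal_extract_operator_from_key_py : Prop := ∀ (key : String), Dom_extract_operator_from_key_py key → Spec_extract_operator_from_key_py key (extract_operator_from_key_py key)

-- ===== LEMMAS AND PROOFS =====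

theorem ab_eq (key : String) :
    extractOpLoopA key [">=", "<=", "!=", "==", ">", "<", "!"] = extract_operator_from_key_py_alt key := by
  have hone : (PySem.Str.slice key none (some 1)).toList = key.toList.take 1 := by
    simp [PySem.Str.toList_slice, PySem.Chars.slice_eq_listSlice, PySem.List.slice]
  rcases h : key.toList with _ | ⟨c, _ | ⟨d, cs⟩⟩
  · have hk : key = "" := String.ext (by simp [h])
    subst hk; decide
  · -- single character
    have h1 : (PySem.Str.slice key none (some 1)).toList = [c] := by simp [hone, h]
    have hm : PySem.Str.slice key (some 1) (some 2) = "" := String.ext (by simp [PySem.Str.toList_slice, PySem.Chars.slice_eq_listSlice, PySem.List.slice, h])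
    by_cases hc1 : c = '>'
    · subst hc1
      have h1' : PySem.Str.slice key none (some 1) = ">" := String.ext (by simp [h1])
      simp [extract_operator_from_key_py_alt, extractOpLoopA, PySem.Str.startswith_eq, h,
        PySem.Chars.startswith, PySem.Str.len_eq, h1', hm, String.ext_iff]
    · by_cases hc2 : c = '<'
      · subst hc2
        have h1' : PySem.Str.slice key none (some 1) = "<" := String.ext (by simp [h1])
        simp [extract_operator_from_key_py_alt, extractOpLoopA, PySem.Str.startswith_eq, h,
          PySem.Chars.startswith, PySem.Str.len_eq, h1', hm, String.ext_iff]
      · by_cases hc3 : c = '!'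
        · subst hc3
          have h1' : PySem.Str.slice key none (some 1) = "!" := String.ext (by simp [h1])
          simp [extract_operator_from_key_py_alt, extractOpLoopA, PySem.Str.startswith_eq, h,
            PySem.Chars.startswith, PySem.Str.len_eq, h1', hm, String.ext_iff]
        · simp [extract_operator_from_key_py_alt, extractOpLoopA, PySem.Str.startswith_eq, h,
            PySem.Chars.startswith, String.ext_iff, h1, hm,
            hc1, hc2, hc3, Ne.symm hc1, Ne.symm hc2, Ne.symm hc3]
  · -- at least two characters
    have h1 : (PySem.Str.slice key none (some 1)).toList = [c] := by simp [hone, h]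
    have hm : (PySem.Str.slice key (some 1) (some 2)).toList = [d] := by simp [PySem.Str.toList_slice, PySem.Chars.slice_eq_listSlice, PySem.List.slice, h]
    by_cases hd : d = '='
    · subst hd
      have hm' : PySem.Str.slice key (some 1) (some 2) = "=" := String.ext (by simp [hm])
      by_cases hc1 : c = '>'
      · subst hc1
        have h1' : PySem.Str.slice key none (some 1) = ">" := String.ext (by simp [h1])
        simp [extract_operator_from_key_py_alt, extractOpLoopA, PySem.Str.startswith_eq, h,
          PySem.Chars.startswith, PySem.Str.len_eq, h1', hm', String.ext_iff]
      · by_cases hc2 : c = '<'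
        · subst hc2
          have h1' : PySem.Str.slice key none (some 1) = "<" := String.ext (by simp [h1])
          simp [extract_operator_from_key_py_alt, extractOpLoopA, PySem.Str.startswith_eq, h,
            PySem.Chars.startswith, PySem.Str.len_eq, h1', hm', String.ext_iff]
        · by_cases hc3 : c = '!'
          · subst hc3
            have h1' : PySem.Str.slice key none (some 1) = "!" := String.ext (by simp [h1])
            simp [extract_operator_from_key_py_alt, extractOpLoopA, PySem.Str.startswith_eq, h,
              PySem.Chars.startswith, PySem.Str.len_eq, h1', hm', String.ext_iff]
          · by_cases hc4 : c = '='
            · subst hc4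
              have h1' : PySem.Str.slice key none (some 1) = "=" := String.ext (by simp [h1])
              simp [extract_operator_from_key_py_alt, extractOpLoopA, PySem.Str.startswith_eq, h,
                PySem.Chars.startswith, PySem.Str.len_eq, h1', hm', String.ext_iff]
            · simp [extract_operator_from_key_py_alt, extractOpLoopA, PySem.Str.startswith_eq, h,
                PySem.Chars.startswith, String.ext_iff, h1, hm,
                hc1, hc2, hc3, hc4, Ne.symm hc1, Ne.symm hc2, Ne.symm hc3, Ne.symm hc4]
    · by_cases hc1 : c = '>'
      · subst hc1
        have h1' : PySem.Str.slice key none (some 1) = ">" := String.ext (by simp [h1])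
        simp [extract_operator_from_key_py_alt, extractOpLoopA, PySem.Str.startswith_eq, h,
          PySem.Chars.startswith, PySem.Str.len_eq, h1', hm, String.ext_iff, hd, Ne.symm hd]
      · by_cases hc2 : c = '<'
        · subst hc2
          have h1' : PySem.Str.slice key none (some 1) = "<" := String.ext (by simp [h1])
          simp [extract_operator_from_key_py_alt, extractOpLoopA, PySem.Str.startswith_eq, h,
            PySem.Chars.startswith, PySem.Str.len_eq, h1', hm, String.ext_iff, hd, Ne.symm hd]
        · by_cases hc3 : c = '!'
          · subst hc3
            have h1' : PySem.Str.slice key none (some 1) = "!" := String.ext (by simp [h1])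
            simp [extract_operator_from_key_py_alt, extractOpLoopA, PySem.Str.startswith_eq, h,
              PySem.Chars.startswith, PySem.Str.len_eq, h1', hm, String.ext_iff, hd, Ne.symm hd]
          · simp [extract_operator_from_key_py_alt, extractOpLoopA, PySem.Str.startswith_eq, h,
              PySem.Chars.startswith, String.ext_iff, h1, hm,
              hc1, hc2, hc3, hd, Ne.symm hc1, Ne.symm hc2, Ne.symm hc3, Ne.symm hd]

-- ===== VERDICT (by name: the statement is the Claim_ definition above) =====
theorem extract_operator_from_key_py_spec : Claim_equal_extract_operator_from_key_py := by
  intro key _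
  unfold Spec_extract_operator_from_key_py extract_operator_from_key_py
  exact ab_eq key
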